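-- pv_equiv track=rewrite | github.com/noliverio/blog | blog/cms/markdown.py | confirm_format
-- ===== SOURCE A (Python) =====
-- def confirm_format(text):
--     mark_open = ('#','{','[','(',)
--     mark_close = ('$','}',']',')',)
--     escape = '\\'
--     pairs = {'$':'#',
--              ')':'(',
--              ']':'[',
--              '}':'{',
--             }
--     stack = []
--     char = 0
--     while char < len(text):
--         if text[char] in mark_open:
--             stack.append(text[char])
--             char += 1
--         elif text[char] == escape:
--             char += 2
--         else:
--             if text[char] in mark_close and pairs[text[char]] == stack[-1]:
--                 stack.pop()
--             char += 1
--     if len(stack) == 0: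
--         return True
--     else:
--         return False
-- ===== SOURCE B (Python) =====
-- def confirm_format(text):
--     pairs = {'$': '#', ')': '(', ']': '[', '}': '{'}
--     opens = '#{[('
--
--     def parse(i, open_mark):
--         # recursive-descent: consume from i looking for the close matching
--         # open_mark; return the index just past it, or None if text ends first
--         while i < len(text):
--             c = text[i]
--             if c == '\\':
--                 i += 2
--             elif c in opens:
--                 j = parse(i + 1, c)
--                 if j is None:
--                     return None
--                 i = j
--             elif c in pairs and pairs[c] == open_mark:
--                 return i + 1
--             else:
--                 i += 1
--         return None
--
--     i = 0
--     while i < len(text):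
--         c = text[i]
--         if c == '\\':
--             i += 2
--         elif c in opens:
--             j = parse(i + 1, c)
--             if j is None:
--                 return False
--             i = j
--         else:
--             i += 1
--     return True
-- ===== Notes on version B (the rewrite author's own statement) =====
-- stated objective: alternative
-- what changed: A's explicit stack machine (one while loop pushing/popping a list) is replaced by a recursive-descent matcher: a recursive parse(i, open_mark) consumes the text looking for the close matching its own open mark and recurses on nested opens, so the call stack replaces the data stack.
import Mathlib
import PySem

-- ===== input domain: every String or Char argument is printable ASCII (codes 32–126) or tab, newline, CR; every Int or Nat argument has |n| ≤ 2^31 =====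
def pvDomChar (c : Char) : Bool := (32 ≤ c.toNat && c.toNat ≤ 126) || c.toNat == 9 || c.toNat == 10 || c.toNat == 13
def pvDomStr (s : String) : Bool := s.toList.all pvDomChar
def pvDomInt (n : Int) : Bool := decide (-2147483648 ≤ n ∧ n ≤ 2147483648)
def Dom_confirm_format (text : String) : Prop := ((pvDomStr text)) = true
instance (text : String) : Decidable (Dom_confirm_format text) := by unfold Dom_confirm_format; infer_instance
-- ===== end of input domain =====

-- B replaces A's explicit-stack machine by a recursive-descent matcher (the call stack replaces
-- the data stack); objective: alternative algorithm, same O(n) cost.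

-- shared character tables (the tuples/dict of the Python sources)
def pvIsOpen (c : Char) : Bool := c = '#' || c = '{' || c = '[' || c = '('
def pvIsClose (c : Char) : Bool := c = '$' || c = '}' || c = ']' || c = ')'
def pvPair (c : Char) : Char := if c = '$' then '#' else if c = ')' then '(' else if c = ']' then '[' else '{'

-- ===== PORT A =====
-- A's while loop; stack head = Python stack[-1]; `none` = the IndexError of stack[-1] on []
def pvGoA (stack : List Char) (l : List Char) : Option (List Char) :=
  match l with
  | [] => some stack
  | c :: rest =>
    if pvIsOpen c then pvGoA (c :: stack) rest
    else if c = '\\' then                            -- char += 2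
      match rest with
      | [] => some stack
      | _ :: rest' => pvGoA stack rest'
    else if pvIsClose c then
      match stack with
      | [] => none
      | t :: s => if pvPair c = t then pvGoA s rest else pvGoA (t :: s) rest
    else pvGoA stack rest

def confirm_format (text : String) : Bool :=
  match pvGoA [] text.toList with
  | some s => decide (s = [])
  | none => false

-- ===== PORT B =====
-- Source B's parse(i, open_mark): consume the list looking for the close matching open_mark;
-- `some j` = the remaining text just past that close, `none` = text ended first.
-- fuel only makes the nested recursion total; with fuel ≥ length it never runs out
-- (fuel 0 / empty list both mean "end of text → None", so the guard is exact).
def pvParse (fuel : Nat) (l : List Char) (om : Char) : Option (List Char) :=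
  match fuel, l with
  | 0, _ => none
  | _ + 1, [] => none
  | f + 1, c :: rest =>
    if c = '\\' then
      match rest with
      | [] => none
      | _ :: rest' => pvParse f rest' om
    else if pvIsOpen c then
      match pvParse f rest c with
      | none => none
      | some j => pvParse f j om
    else if pvIsClose c && pvPair c = om then some rest
    else pvParse f rest om

-- Source B's top-level loop (open_mark is None there: close marks just skip)
def pvTop (fuel : Nat) (l : List Char) : Bool :=
  match fuel, l with
  | 0, _ => true
  | _ + 1, [] => true
  | f + 1, c :: rest =>
    if c = '\\' then
      match rest with
      | [] => true
      | _ :: rest' => pvTop f rest'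
    else if pvIsOpen c then
      match pvParse f rest c with
      | none => false
      | some j => pvTop f j
    else pvTop f rest

def confirm_format_alt (text : String) : Bool :=
  pvTop (text.toList.length + 1) text.toList

-- ===== PRECONDITION & SPEC =====
-- Pre_ excludes exactly the inputs where A raises IndexError (an unescaped close mark met while
-- the stack is empty); nothing else is excluded.
def pvSafe (stack : List Char) (l : List Char) : Bool :=
  match l with
  | [] => true
  | c :: rest =>
    if c = '\\' then
      match rest with
      | [] => true
      | _ :: rest' => pvSafe stack rest'
    else if pvIsOpen c then pvSafe (c :: stack) rest
    else if pvIsClose c then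
      match stack with
      | [] => false
      | t :: s => pvSafe (if pvPair c = t then s else t :: s) rest
    else pvSafe stack rest

def Pre_confirm_format (text : String) : Prop := pvSafe [] text.toList = true
instance (text : String) : Decidable (Pre_confirm_format text) := by unfold Pre_confirm_format; infer_instance

def pvWitness_confirm_format : String := "(\\)[]"

def Spec_confirm_format (text : String) (out : Bool) : Prop := out = confirm_format_alt text
instance (text : String) (out : Bool) : Decidable (Spec_confirm_format text out) := by unfold Spec_confirm_format; infer_instance

-- ===== CLAIM (what is proved, stated in full; the proofs are below) =====
def Claim_equal_confirm_format : Prop := ∀ (text : String), Dom_confirm_format text → Pre_confirm_format text → Spec_confirm_format text (confirm_format text)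

-- ===== LEMMAS AND PROOFS =====

-- Core lemma: with a nonempty stack t :: s, A's walk of l is exactly B's parse for open mark t:
-- if parse finds the matching close (some j), A continues as pvGoA s j (and safety transfers,
-- and j is strictly shorter); if parse hits the end (none), A ends with a nonempty stack.
theorem pvL : ∀ (n : ℕ) (l : List Char), l.length = n → ∀ (f : ℕ), l.length < f →
    ∀ (t : Char) (s : List Char),
    (∀ j, pvParse f l t = some j →
        j.length < l.length ∧ pvGoA (t :: s) l = pvGoA s j ∧
        (pvSafe (t :: s) l = true → pvSafe s j = true)) ∧
    (pvParse f l t = none → ∃ s', pvGoA (t :: s) l = some s' ∧ s' ≠ []) := by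
  intro n
  induction n using Nat.strong_induction_on with
  | _ n ih =>
    intro l hl f hf t s
    match l, f with
    | [], f =>
      refine ⟨fun j hj => ?_, fun _ => ⟨t :: s, by simp [pvGoA]⟩⟩
      exfalso; cases f <;> simp [pvParse] at hj
    | c :: rest, 0 => exact absurd hf (by simp)
    | c :: rest, f' + 1 =>
      subst hl
      have hf' : rest.length < f' := by simpa using hf
      by_cases hc : c = '\\'
      · subst hc
        have hop : pvIsOpen '\\' = false := by decide
        match rest with
        | [] =>
          exact ⟨fun j hj => by simp [pvParse] at hj, fun _ => ⟨t :: s, by simp [pvGoA, hop]⟩⟩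
        | d :: rest' =>
          have hfr : rest'.length < f' := by simp at hf'; omega
          have IH := ih rest'.length (by simp) rest' rfl f' hfr t s
          refine ⟨fun j hj => ?_, fun hj => ?_⟩
          · simp only [pvParse] at hj
            obtain ⟨h1, h2, h3⟩ := IH.1 j hj
            refine ⟨by simp; omega, ?_, ?_⟩
            · rw [pvGoA.eq_def]; simpa [hop] using h2
            · intro hs; apply h3; rw [pvSafe.eq_def] at hs; simpa using hs
          · simp only [pvParse] at hj
            obtain ⟨s', h1, h2⟩ := IH.2 hj
            exact ⟨s', by rw [pvGoA.eq_def]; simpa [hop] using h1, h2⟩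
      · by_cases hop : pvIsOpen c = true
        · -- an open mark: pvParse recurses for c, then continues for t
          have hA : pvGoA (t :: s) (c :: rest) = pvGoA (c :: t :: s) rest := by
            rw [pvGoA.eq_def]; simp [hop]
          have hS : pvSafe (t :: s) (c :: rest) = pvSafe (c :: t :: s) rest := by
            rw [pvSafe.eq_def]; simp [hop, hc]
          have hP : pvParse (f' + 1) (c :: rest) t =
              match pvParse f' rest c with
              | none => none
              | some j => pvParse f' j t := by
            rw [pvParse.eq_def]; simp [hop, hc]
          have IH1 := ih rest.length (by simp) rest rfl f' hf' c (t :: s)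
          refine ⟨fun j hj => ?_, fun hj => ?_⟩
          · rw [hP] at hj
            cases h1 : pvParse f' rest c with
            | none => rw [h1] at hj; exact absurd hj (by simp)
            | some j1 =>
              rw [h1] at hj; simp only at hj
              obtain ⟨hl1, hA1, hS1⟩ := IH1.1 j1 h1
              have IH2 := ih j1.length (by simp; omega) j1 rfl f' (by omega) t s
              obtain ⟨hl2, hA2, hS2⟩ := IH2.1 j hj
              refine ⟨by simp; omega, ?_, ?_⟩
              · rw [hA, hA1, hA2]
              · intro hs; exact hS2 (hS1 (by rwa [hS] at hs))
          · rw [hP] at hj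
            cases h1 : pvParse f' rest c with
            | none =>
              obtain ⟨s', hg, hne⟩ := IH1.2 h1
              exact ⟨s', by rw [hA, hg], hne⟩
            | some j1 =>
              rw [h1] at hj; simp only at hj
              obtain ⟨hl1, hA1, hS1⟩ := IH1.1 j1 h1
              have IH2 := ih j1.length (by simp; omega) j1 rfl f' (by omega) t s
              obtain ⟨s', hg, hne⟩ := IH2.2 hj
              exact ⟨s', by rw [hA, hA1, hg], hne⟩
        · by_cases hcl : pvIsClose c = true
          · by_cases hp : pvPair c = t
            · -- matching close: parse returns, A pops
              refine ⟨fun j hj => ?_, fun hj => ?_⟩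
              · rw [pvParse.eq_def] at hj; simp [hop, hc, hcl, hp] at hj
                subst hj
                refine ⟨by simp, ?_, ?_⟩
                · rw [pvGoA.eq_def]; simp [hop, hc, hcl, hp]
                · intro hs; rw [pvSafe.eq_def] at hs; simpa [hop, hc, hcl, hp] using hs
              · exfalso; rw [pvParse.eq_def] at hj; simp [hop, hc, hcl, hp] at hj
            · -- non-matching close: both skip it
              have hA : pvGoA (t :: s) (c :: rest) = pvGoA (t :: s) rest := by
                rw [pvGoA.eq_def]; simp [hop, hc, hcl, hp]
              have hS : pvSafe (t :: s) (c :: rest) = pvSafe (t :: s) rest := by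
                rw [pvSafe.eq_def]; simp [hop, hc, hcl, hp]
              have hP : pvParse (f' + 1) (c :: rest) t = pvParse f' rest t := by
                rw [pvParse.eq_def]; simp [hop, hc, hcl, hp]
              have IH := ih rest.length (by simp) rest rfl f' hf' t s
              refine ⟨fun j hj => ?_, fun hj => ?_⟩
              · rw [hP] at hj
                obtain ⟨h1, h2, h3⟩ := IH.1 j hj
                exact ⟨by simp; omega, by rw [hA, h2], fun hs => h3 (by rwa [hS] at hs)⟩
              · rw [hP] at hj
                obtain ⟨s', hg, hne⟩ := IH.2 hj
                exact ⟨s', by rw [hA, hg], hne⟩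
          · -- ordinary character: both skip it
            have hA : pvGoA (t :: s) (c :: rest) = pvGoA (t :: s) rest := by
              rw [pvGoA.eq_def]; simp [hop, hc, hcl]
            have hS : pvSafe (t :: s) (c :: rest) = pvSafe (t :: s) rest := by
              rw [pvSafe.eq_def]; simp [hop, hc, hcl]
            have hP : pvParse (f' + 1) (c :: rest) t = pvParse f' rest t := by
              rw [pvParse.eq_def]; simp [hop, hc, hcl]
            have IH := ih rest.length (by simp) rest rfl f' hf' t s
            refine ⟨fun j hj => ?_, fun hj => ?_⟩
            · rw [hP] at hj
              obtain ⟨h1, h2, h3⟩ := IH.1 j hj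
              exact ⟨by simp; omega, by rw [hA, h2], fun hs => h3 (by rwa [hS] at hs)⟩
            · rw [hP] at hj
              obtain ⟨s', hg, hne⟩ := IH.2 hj
              exact ⟨s', by rw [hA, hg], hne⟩

-- Top lemma: under Pre_, A's result equals B's top-level loop.
theorem pvT : ∀ (n : ℕ) (l : List Char), l.length = n → ∀ (f : ℕ), l.length < f →
    pvSafe [] l = true →
    (match pvGoA [] l with | some s => decide (s = []) | none => false) = pvTop f l := by
  intro n
  induction n using Nat.strong_induction_on with
  | _ n ih =>
    intro l hl f hf hsafe
    match l, f with
    | [], f =>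
      cases f <;> simp [pvGoA, pvTop]
    | c :: rest, 0 => exact absurd hf (by simp)
    | c :: rest, f' + 1 =>
      subst hl
      have hf' : rest.length < f' := by simpa using hf
      by_cases hc : c = '\\'
      · subst hc
        have hop : pvIsOpen '\\' = false := by decide
        match rest with
        | [] => simp [pvGoA, pvTop, hop]
        | d :: rest' =>
          have hs' : pvSafe [] rest' = true := by
            rw [pvSafe.eq_def] at hsafe; simpa using hsafe
          have hA : pvGoA [] ('\\' :: d :: rest') = pvGoA [] rest' := by
            rw [pvGoA.eq_def]; simp [hop]
          have hT : pvTop (f' + 1) ('\\' :: d :: rest') = pvTop f' rest' := by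
            rw [pvTop.eq_def]; simp
          rw [hA, hT]
          exact ih rest'.length (by simp) rest' rfl f' (by simp at hf'; omega) hs'
      · by_cases hop : pvIsOpen c = true
        · have hA : pvGoA [] (c :: rest) = pvGoA [c] rest := by
            rw [pvGoA.eq_def]; simp [hop]
          have hS : pvSafe [] (c :: rest) = pvSafe [c] rest := by
            rw [pvSafe.eq_def]; simp [hop, hc]
          have hT : pvTop (f' + 1) (c :: rest) =
              match pvParse f' rest c with
              | none => false
              | some j => pvTop f' j := by
            rw [pvTop.eq_def]; simp [hop, hc]
          have L := pvL rest.length rest rfl f' hf' c []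
          rw [hA, hT]
          cases h1 : pvParse f' rest c with
          | none =>
            obtain ⟨s', hg, hne⟩ := L.2 h1
            simp [hg, hne]
          | some j =>
            obtain ⟨hl1, hA1, hS1⟩ := L.1 j h1
            rw [hA1]
            exact ih j.length (by simp; omega) j rfl f' (by omega)
              (hS1 (by rwa [hS] at hsafe))
        · by_cases hcl : pvIsClose c = true
          · exfalso
            rw [pvSafe.eq_def] at hsafe
            simp [hop, hc, hcl] at hsafe
          · have hA : pvGoA [] (c :: rest) = pvGoA [] rest := by
              rw [pvGoA.eq_def]; simp [hop, hc, hcl]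
            have hS : pvSafe [] rest = true := by
              rw [pvSafe.eq_def] at hsafe; simpa [hop, hc, hcl] using hsafe
            have hT : pvTop (f' + 1) (c :: rest) = pvTop f' rest := by
              rw [pvTop.eq_def]; simp [hop, hc]
            rw [hA, hT]
            exact ih rest.length (by simp) rest rfl f' hf' hS

-- ===== VERDICT (by name: the statement is the Claim_ definition above) =====
theorem confirm_format_spec : Claim_equal_confirm_format := by
  intro text _ hpre
  unfold Spec_confirm_format confirm_format confirm_format_alt
  exact pvT text.toList.length text.toList rfl (text.toList.length + 1) (Nat.lt_succ_self _) hpre
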